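-- pv_equiv track=rewrite | github.com/zachstarr03/FreeCodeCamp-Daily-Python-Problems | src/MarchProblems/AnniversaryMilestones.py | get_milestone
-- ===== SOURCE A (Python) =====
-- def get_milestone(years):
--
--     # dictionary which stores the years married as the key and the milestone name as the value
--     anniversary = {
--                     1: "Paper", 5: "Wood", 10: "Tin", 25: "Silver",
--                     40: "Ruby", 50: "Gold", 60: "Diamond", 70: "Platinum"
--                   }
--
--     # sorted list of years married to get the key for the dictionary
--     milestone_years = [1, 5, 10, 25, 40, 50, 60, 70]
--
--     # assign the current milestone to "Newlyweds"
--     current_milestone = "Newlyweds"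
--
--     # increment through the sorted years married list, if the year is less than or equal to the input,
--     # set the current milestone to the value of that year inside the dictionary -> O(1) lookup for a dictionary.
--     # the else allows the loop to break, so iterations don't go all the way until the end of the sorted list for
--     # any given input. It is explicitly shown to also help showcase the logic completely and to follow easier.
--     for year in milestone_years:
--         if year <= years:
--             current_milestone = anniversary[year]
--         else:
--             break
--
--     return current_milestone
-- ===== SOURCE B (Python) =====
-- THRESHOLDS = [1, 5, 10, 25, 40, 50, 60, 70]
-- NAMES = ["Paper", "Wood", "Tin", "Silver", "Ruby", "Gold", "Diamond", "Platinum"]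
--
--
-- def get_milestone(years):
--     # binary search for the number of thresholds <= years (bisect_right by hand)
--     lo, hi = 0, len(THRESHOLDS)
--     while lo < hi:
--         mid = (lo + hi) // 2
--         if THRESHOLDS[mid] <= years:
--             lo = mid + 1
--         else:
--             hi = mid
--     return "Newlyweds" if lo == 0 else NAMES[lo - 1]
-- ===== Notes on version B (the rewrite author's own statement) =====
-- stated objective: alternative
-- what changed: Replaces A's linear accumulate-then-break scan with dict lookups by a hand-rolled bisect_right binary search over the sorted thresholds, indexing into a parallel names list.
import Mathlib
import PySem

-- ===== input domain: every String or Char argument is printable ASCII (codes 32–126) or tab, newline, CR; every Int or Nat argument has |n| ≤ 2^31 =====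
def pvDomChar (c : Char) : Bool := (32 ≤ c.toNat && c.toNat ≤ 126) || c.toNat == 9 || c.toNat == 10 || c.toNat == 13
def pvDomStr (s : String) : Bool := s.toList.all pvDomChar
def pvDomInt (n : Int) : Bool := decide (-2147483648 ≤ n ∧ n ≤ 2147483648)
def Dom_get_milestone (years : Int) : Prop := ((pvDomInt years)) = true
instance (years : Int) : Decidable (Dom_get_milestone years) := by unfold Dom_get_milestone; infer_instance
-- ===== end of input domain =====

-- B replaces A's linear scan-with-break (dict lookup per step) by a binary search
-- over the sorted thresholds with a parallel names list; equal return value proved.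

-- ===== PORT A =====
-- the dictionary A builds (keys are exactly the milestone years, so every lookup hits)
def pvAnniv : PySem.Dict Int String :=
  PySem.Dict.ofList [(1, "Paper"), (5, "Wood"), (10, "Tin"), (25, "Silver"),
                     (40, "Ruby"), (50, "Gold"), (60, "Diamond"), (70, "Platinum")]

-- A's for-loop with break: walk the sorted list, updating the accumulator, stop at the first year > years
def pvALoop (years : Int) : List Int → String → String
  | [], cur => cur
  | y :: rest, cur =>
      if y ≤ years then pvALoop years rest ((pvAnniv.get? y).getD "") else cur

def get_milestone (years : Int) : String :=
  pvALoop years [1, 5, 10, 25, 40, 50, 60, 70] "Newlyweds"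

-- ===== PORT B =====
def pvThresholds : List Int := [1, 5, 10, 25, 40, 50, 60, 70]
def pvNames : List String := ["Paper", "Wood", "Tin", "Silver", "Ruby", "Gold", "Diamond", "Platinum"]

-- the while-loop of Source B: bisect_right by hand
def pvBisect (years : Int) (lo hi : Nat) : Nat :=
  if _h : lo < hi then
    let mid := (lo + hi) / 2
    if (pvThresholds.getD mid 0) ≤ years then pvBisect years (mid + 1) hi
    else pvBisect years lo mid
  else lo
termination_by hi - lo
decreasing_by all_goals omega

def get_milestone_alt (years : Int) : String :=
  let lo := pvBisect years 0 pvThresholds.length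
  if lo = 0 then "Newlyweds" else pvNames.getD (lo - 1) ""

-- ===== PRECONDITION & SPEC =====
def Spec_get_milestone (years : Int) (out : String) : Prop := out = get_milestone_alt years
instance (years : Int) (out : String) : Decidable (Spec_get_milestone years out) := by unfold Spec_get_milestone; infer_instance

-- ===== CLAIM (what is proved, stated in full; the proofs are below) =====
def Claim_equal_get_milestone : Prop := ∀ (years : Int), Dom_get_milestone years → Spec_get_milestone years (get_milestone years)

-- ===== LEMMAS AND PROOFS =====

theorem pvA_0 (years : Int) (h2 : years < 1) :
    get_milestone years = "Newlyweds" := by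
  simp only [get_milestone, pvALoop]
  repeat (first | rw [if_pos (by omega)] | rw [if_neg (by omega)])
  all_goals rfl

theorem pvB_0 (years : Int) (h2 : years < 1) :
    pvBisect years 0 8 = 0 := by
  repeat (first
    | rw [if_pos (by omega)]
    | rw [if_neg (by omega)]
    | (rw [pvBisect]; norm_num [pvThresholds]))

theorem pvA_1 (years : Int) (h1 : 1 ≤ years) (h2 : years < 5) :
    get_milestone years = "Paper" := by
  simp only [get_milestone, pvALoop]
  repeat (first | rw [if_pos (by omega)] | rw [if_neg (by omega)])
  all_goals rfl

theorem pvB_1 (years : Int) (h1 : 1 ≤ years) (h2 : years < 5) :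
    pvBisect years 0 8 = 1 := by
  repeat (first
    | rw [if_pos (by omega)]
    | rw [if_neg (by omega)]
    | (rw [pvBisect]; norm_num [pvThresholds]))

theorem pvA_2 (years : Int) (h1 : 5 ≤ years) (h2 : years < 10) :
    get_milestone years = "Wood" := by
  simp only [get_milestone, pvALoop]
  repeat (first | rw [if_pos (by omega)] | rw [if_neg (by omega)])
  all_goals rfl

theorem pvB_2 (years : Int) (h1 : 5 ≤ years) (h2 : years < 10) :
    pvBisect years 0 8 = 2 := by
  repeat (first
    | rw [if_pos (by omega)]
    | rw [if_neg (by omega)]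
    | (rw [pvBisect]; norm_num [pvThresholds]))

theorem pvA_3 (years : Int) (h1 : 10 ≤ years) (h2 : years < 25) :
    get_milestone years = "Tin" := by
  simp only [get_milestone, pvALoop]
  repeat (first | rw [if_pos (by omega)] | rw [if_neg (by omega)])
  all_goals rfl

theorem pvB_3 (years : Int) (h1 : 10 ≤ years) (h2 : years < 25) :
    pvBisect years 0 8 = 3 := by
  repeat (first
    | rw [if_pos (by omega)]
    | rw [if_neg (by omega)]
    | (rw [pvBisect]; norm_num [pvThresholds]))

theorem pvA_4 (years : Int) (h1 : 25 ≤ years) (h2 : years < 40) :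
    get_milestone years = "Silver" := by
  simp only [get_milestone, pvALoop]
  repeat (first | rw [if_pos (by omega)] | rw [if_neg (by omega)])
  all_goals rfl

theorem pvB_4 (years : Int) (h1 : 25 ≤ years) (h2 : years < 40) :
    pvBisect years 0 8 = 4 := by
  repeat (first
    | rw [if_pos (by omega)]
    | rw [if_neg (by omega)]
    | (rw [pvBisect]; norm_num [pvThresholds]))

theorem pvA_5 (years : Int) (h1 : 40 ≤ years) (h2 : years < 50) :
    get_milestone years = "Ruby" := by
  simp only [get_milestone, pvALoop]
  repeat (first | rw [if_pos (by omega)] | rw [if_neg (by omega)])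
  all_goals rfl

theorem pvB_5 (years : Int) (h1 : 40 ≤ years) (h2 : years < 50) :
    pvBisect years 0 8 = 5 := by
  repeat (first
    | rw [if_pos (by omega)]
    | rw [if_neg (by omega)]
    | (rw [pvBisect]; norm_num [pvThresholds]))

theorem pvA_6 (years : Int) (h1 : 50 ≤ years) (h2 : years < 60) :
    get_milestone years = "Gold" := by
  simp only [get_milestone, pvALoop]
  repeat (first | rw [if_pos (by omega)] | rw [if_neg (by omega)])
  all_goals rfl

theorem pvB_6 (years : Int) (h1 : 50 ≤ years) (h2 : years < 60) :
    pvBisect years 0 8 = 6 := by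
  repeat (first
    | rw [if_pos (by omega)]
    | rw [if_neg (by omega)]
    | (rw [pvBisect]; norm_num [pvThresholds]))

theorem pvA_7 (years : Int) (h1 : 60 ≤ years) (h2 : years < 70) :
    get_milestone years = "Diamond" := by
  simp only [get_milestone, pvALoop]
  repeat (first | rw [if_pos (by omega)] | rw [if_neg (by omega)])
  all_goals rfl

theorem pvB_7 (years : Int) (h1 : 60 ≤ years) (h2 : years < 70) :
    pvBisect years 0 8 = 7 := by
  repeat (first
    | rw [if_pos (by omega)]
    | rw [if_neg (by omega)]
    | (rw [pvBisect]; norm_num [pvThresholds]))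

theorem pvA_8 (years : Int) (h1 : 70 ≤ years) :
    get_milestone years = "Platinum" := by
  simp only [get_milestone, pvALoop]
  repeat (first | rw [if_pos (by omega)] | rw [if_neg (by omega)])
  all_goals rfl

theorem pvB_8 (years : Int) (h1 : 70 ≤ years) :
    pvBisect years 0 8 = 8 := by
  repeat (first
    | rw [if_pos (by omega)]
    | rw [if_neg (by omega)]
    | (rw [pvBisect]; norm_num [pvThresholds]))

theorem get_milestone_cases (years : Int) :
    get_milestone years = get_milestone_alt years := by
  simp only [get_milestone_alt, pvThresholds, pvNames, List.length_cons, List.length_nil]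
  rcases lt_or_ge years 1 with h|h0
  · rw [pvA_0 years h, pvB_0 years h]; rfl
  rcases lt_or_ge years 5 with h|h1
  · rw [pvA_1 years h0 h, pvB_1 years h0 h]; rfl
  rcases lt_or_ge years 10 with h|h2
  · rw [pvA_2 years h1 h, pvB_2 years h1 h]; rfl
  rcases lt_or_ge years 25 with h|h3
  · rw [pvA_3 years h2 h, pvB_3 years h2 h]; rfl
  rcases lt_or_ge years 40 with h|h4
  · rw [pvA_4 years h3 h, pvB_4 years h3 h]; rfl
  rcases lt_or_ge years 50 with h|h5
  · rw [pvA_5 years h4 h, pvB_5 years h4 h]; rfl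
  rcases lt_or_ge years 60 with h|h6
  · rw [pvA_6 years h5 h, pvB_6 years h5 h]; rfl
  rcases lt_or_ge years 70 with h|h7
  · rw [pvA_7 years h6 h, pvB_7 years h6 h]; rfl
  rw [pvA_8 years h7, pvB_8 years h7]; rfl

-- ===== VERDICT (by name: the statement is the Claim_ definition above) =====
theorem get_milestone_spec : Claim_equal_get_milestone := by
  intro years _
  exact get_milestone_cases years
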